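-- pv_equiv track=rewrite | github.com/gendo7985/Coding-Practice | Programmers/level_2/friends_4_block.py | solution
-- ===== SOURCE A (Python) =====
-- def erase(m, n, nb):
--     deleted = set()
--     for i in range(1, m):
--         for j in range(1, n):
--             if nb[i][j] and nb[i - 1][j - 1] == nb[i - 1][j] == nb[i][j - 1] == nb[i][j]:
--                 deleted.update([(i, j), (i - 1, j), (i, j - 1), (i - 1, j - 1)])
--     for (x, y) in deleted:
--         nb[x][y] = False
--     return len(deleted)
--
-- def gravity(m, n, nb):
--     for i in range(m - 2, -1, -1):
--         for j in range(n):
--             if nb[i][j] and (not nb[i + 1][j]):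
--                 k = 1
--                 while not nb[i + k][j]:
--                     k += 1
--                     if i + k > m - 1:
--                         break
--                 nb[i][j], nb[i + k - 1][j] = nb[i + k - 1][j], nb[i][j]
--
-- def solution(m, n, board):
--     nb = [[j for j in i] for i in board]
--     ans = 0
--     while True:
--         erased = erase(m, n, nb)
--         if erased == 0:
--             return ans
--         else:
--             ans += erased
--             gravity(m, n, nb)
-- ===== SOURCE B (Python) =====
-- def solution(m, n, board):
--     grid = [list(row) for row in board]
--     total = 0
--     while True:
--         blocks = [(i, j) for i in range(m - 1) for j in range(n - 1)
--                   if grid[i][j] and grid[i][j] == grid[i][j + 1] == grid[i + 1][j] == grid[i + 1][j + 1]]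
--         cells = {(i + di, j + dj) for (i, j) in blocks for di in (0, 1) for dj in (0, 1)}
--         if not cells:
--             return total
--         total += len(cells)
--         for (x, y) in cells:
--             grid[x][y] = False
--         for j in range(n):
--             kept = [grid[i][j] for i in range(m) if grid[i][j]]
--             for i in range(m):
--                 grid[i][j] = kept[i - m + len(kept)] if i >= m - len(kept) else False
-- ===== Notes on version B (the rewrite author's own statement) =====
-- stated objective: alternative
-- what changed: Gravity is rewritten as per-column compaction (collect each column's surviving cells and repack them at the bottom in one pass) instead of A's repeated downward bubbling swaps with an inner falling-distance walk, and the erase phase is decomposed into a matched-block comprehension whose 2x2 cells are then unioned into a set, instead of A's in-loop set.update of the four corners.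
-- outside the precondition, e.g. on solution(2, 2, ['aab', 'aab']): A returns 4, B returns 4; on solution(2, 2, ['aa', 'aa', 'bb']): A returns 4, B returns 4
import Mathlib
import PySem

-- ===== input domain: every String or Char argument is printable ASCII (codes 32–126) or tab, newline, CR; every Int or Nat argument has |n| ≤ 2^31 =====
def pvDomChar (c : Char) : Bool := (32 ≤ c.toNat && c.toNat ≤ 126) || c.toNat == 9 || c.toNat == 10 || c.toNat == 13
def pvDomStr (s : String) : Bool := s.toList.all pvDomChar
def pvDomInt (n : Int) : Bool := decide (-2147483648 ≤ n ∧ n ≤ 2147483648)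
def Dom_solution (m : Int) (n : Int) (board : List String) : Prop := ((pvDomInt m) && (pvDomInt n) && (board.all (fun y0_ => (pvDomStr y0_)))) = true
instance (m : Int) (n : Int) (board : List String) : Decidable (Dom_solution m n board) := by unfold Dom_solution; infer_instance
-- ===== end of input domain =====

-- B replaces A's swap-based gravity by per-column compaction and A's incremental erase set by a
-- block-comprehension whose cells are unioned; equivalence of the return value is proved on
-- well-formed boards (m rows of length n).

-- ===== PORT A =====
-- cells: `some c` is a character (truthy), `none` is Python's False.

def gridGet (g : List (List (Option Char))) (i j : Int) : Option Char :=
  PySem.List.pyGetD (PySem.List.pyGetD g i []) j none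

def gridSet (g : List (List (Option Char))) (i j : Int) (v : Option Char) : List (List (Option Char)) :=
  PySem.List.pySetD g i (PySem.List.pySetD (PySem.List.pyGetD g i []) j v)

-- `for (x, y) in deleted: nb[x][y] = False`  (both Pythons clear with this loop)
def clearCells (cells : List (Int × Int)) (g : List (List (Option Char))) : List (List (Option Char)) :=
  cells.foldl (fun g p => gridSet g p.1 p.2 none) g

-- the set built by A's erase
def eraseSet (m n : Int) (nb : List (List (Option Char))) : PySem.Set (Int × Int) :=
  (PySem.List.pyRange 1 m 1).foldl (fun s i =>
    (PySem.List.pyRange 1 n 1).foldl (fun s j =>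
      if (gridGet nb i j).isSome ∧ gridGet nb (i-1) (j-1) = gridGet nb (i-1) j
          ∧ gridGet nb (i-1) j = gridGet nb i (j-1) ∧ gridGet nb i (j-1) = gridGet nb i j
      then PySem.Set.update s [(i, j), (i-1, j), (i, j-1), (i-1, j-1)]
      else s) s) PySem.Set.empty

-- the inner `while not nb[i+k][j]` walk (fuel bounds the walk; (m-i).toNat steps always suffice)
def gravWhile (m : Int) (nb : List (List (Option Char))) (i j : Int) : Int → Nat → Int
  | k, 0 => k
  | k, fuel+1 =>
      if (gridGet nb (i+k) j).isSome then k
      else if i + (k+1) > m - 1 then k + 1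
      else gravWhile m nb i j (k+1) fuel

def gravityA (m n : Int) (nb : List (List (Option Char))) : List (List (Option Char)) :=
  (PySem.List.pyRange (m-2) (-1) (-1)).foldl (fun g i =>
    (PySem.List.pyRange 0 n 1).foldl (fun g j =>
      if (gridGet g i j).isSome ∧ gridGet g (i+1) j = none then
        let k := gravWhile m g i j 1 (m - i).toNat
        gridSet (gridSet g i j (gridGet g (i+k-1) j)) (i+k-1) j (gridGet g i j)
      else g) g) nb

-- `while True:` — fuel (m*n).toNat + 1 rounds always suffices (each productive round clears ≥ 4 cells)
def loopA (m n : Int) : Nat → List (List (Option Char)) → Int → Int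
  | 0, _, ans => ans
  | fuel+1, nb, ans =>
      let s := eraseSet m n nb
      let erased := PySem.Set.len s
      let nb := clearCells s nb
      if erased = 0 then ans else loopA m n fuel (gravityA m n nb) (ans + erased)

def solution (m : Int) (n : Int) (board : List String) : Int :=
  loopA m n ((m*n).toNat + 1) (board.map (fun s => s.toList.map some)) 0

-- ===== PORT B =====

def blockMatchB (g : List (List (Option Char))) (i j : Int) : Bool :=
  (gridGet g i j).isSome && (gridGet g i j == gridGet g i (j+1))
    && (gridGet g i (j+1) == gridGet g (i+1) j) && (gridGet g (i+1) j == gridGet g (i+1) (j+1))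

-- `blocks = [(i, j) for i in range(m-1) for j in range(n-1) if …]`
def blocksB (m n : Int) (g : List (List (Option Char))) : List (Int × Int) :=
  (PySem.List.pyRange 0 (m-1) 1).flatMap (fun i =>
    ((PySem.List.pyRange 0 (n-1) 1).filter (fun j => blockMatchB g i j)).map (fun j => (i, j)))

-- `cells = {(i+di, j+dj) for (i, j) in blocks for di in (0,1) for dj in (0,1)}`
def cellsB (m n : Int) (g : List (List (Option Char))) : PySem.Set (Int × Int) :=
  PySem.Set.ofList ((blocksB m n g).flatMap (fun p =>
    [(p.1, p.2), (p.1, p.2+1), (p.1+1, p.2), (p.1+1, p.2+1)]))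

-- one column repacked: survivors at the bottom, False above
def compactColumn (m j : Int) (g : List (List (Option Char))) : List (List (Option Char)) :=
  let kept := ((PySem.List.pyRange 0 m 1).filter (fun i => (gridGet g i j).isSome)).map
    (fun i => gridGet g i j)
  (PySem.List.pyRange 0 m 1).foldl (fun g' i =>
    gridSet g' i j (if m - (kept.length : Int) ≤ i
                    then PySem.List.pyGetD kept (i - m + (kept.length : Int)) none
                    else none)) g

def loopB (m n : Int) : Nat → List (List (Option Char)) → Int → Int
  | 0, _, total => total
  | fuel+1, g, total =>
      let cells := cellsB m n g
      if cells.isEmpty then total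
      else
        let total := total + PySem.Set.len cells
        let g := clearCells cells g
        let g := (PySem.List.pyRange 0 n 1).foldl (fun g j => compactColumn m j g) g
        loopB m n fuel g total

def solution_alt (m : Int) (n : Int) (board : List String) : Int :=
  loopB m n ((m*n).toNat + 1) (board.map (fun s => s.toList.map some)) 0

-- ===== PRECONDITION & SPEC =====
-- Pre_ admits well-formed boards (exactly m rows of length n) and all degenerate sizes (m ≤ 1 or
-- n ≤ 1, where the scan loops are empty and the board is never read); it excludes boards whose
-- dimensions disagree with m,n when m,n ≥ 2, where A usually raises IndexError (on ragged or
-- oversized boards that still cover the m×n corner A instead returns the answer of that subgrid).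
def Pre_solution (m : Int) (n : Int) (board : List String) : Prop :=
  ((board.length : Int) = m ∧ 0 ≤ n ∧ ∀ s ∈ board, (s.length : Int) = n) ∨ m ≤ 1 ∨ n ≤ 1
instance (m : Int) (n : Int) (board : List String) : Decidable (Pre_solution m n board) := by
  unfold Pre_solution; infer_instance

def pvWitness_solution : Int × Int × List String := (2, 3, ["aab", "abb"])

def Spec_solution (m : Int) (n : Int) (board : List String) (out : Int) : Prop := out = solution_alt m n board
instance (m : Int) (n : Int) (board : List String) (out : Int) : Decidable (Spec_solution m n board out) := by unfold Spec_solution; infer_instance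

-- ===== CLAIM (what is proved, stated in full; the proofs are below) =====
def Claim_equal_solution : Prop := ∀ (m : Int) (n : Int) (board : List String), Dom_solution m n board → Pre_solution m n board → Spec_solution m n board (solution m n board)

-- ===== LEMMAS AND PROOFS =====


def Dims (g : List (List (Option Char))) (M N : Nat) : Prop :=
  g.length = M ∧ ∀ r ∈ g, r.length = N

def colN (g : List (List (Option Char))) (y : Nat) : List (Option Char) :=
  g.map (fun r => r.getD y none)

def getN (g : List (List (Option Char))) (x y : Nat) : Option Char :=
  (g.getD x []).getD y none

theorem length_colN (g : List (List (Option Char))) (y : Nat) : (colN g y).length = g.length := by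
  simp [colN]

theorem gridGet_cast (g : List (List (Option Char))) (x y : Nat) :
    gridGet g (x : Int) (y : Int) = getN g x y := by
  simp [gridGet, getN]

theorem gridGet_col (g : List (List (Option Char))) (a : Int) (y : Nat) :
    gridGet g a (y : Int) = PySem.List.pyGetD (colN g y) a none := by
  have h := PySem.List.pyGetD_map (fun r : List (Option Char) => r.getD y none) g a ([] : List (Option Char))
  simpa [gridGet, colN] using h.symm

theorem getN_col (g : List (List (Option Char))) (x y : Nat) :
    getN g x y = (colN g y).getD x none := by
  rw [← gridGet_cast, gridGet_col]; simp

theorem gridSet_cast (g : List (List (Option Char))) (x y : Nat) (v : Option Char) :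
    gridSet g (x : Int) (y : Int) v = g.set x ((g.getD x []).set y v) := by
  simp [gridSet]

theorem getD_set_self {α : Type} (l : List α) (x : Nat) (a d : α) (h : x < l.length) :
    (l.set x a).getD x d = a := by
  rw [List.getD_eq_getElem?_getD, List.getElem?_set_self h]; rfl

theorem getD_set_ne {α : Type} (l : List α) (x i : Nat) (a d : α) (h : x ≠ i) :
    (l.set x a).getD i d = l.getD i d := by
  rw [List.getD_eq_getElem?_getD, List.getElem?_set_ne h, ← List.getD_eq_getElem?_getD]

theorem dims_gridSet {g : List (List (Option Char))} {M N : Nat} (h : Dims g M N)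
    (x y : Nat) (v : Option Char) : Dims (gridSet g (x : Int) (y : Int) v) M N := by
  rw [gridSet_cast]
  obtain ⟨hl, hr⟩ := h
  by_cases hx : x < g.length
  · refine ⟨by simpa using hl, ?_⟩
    intro r hrm
    rcases List.mem_or_eq_of_mem_set hrm with h1 | h1
    · exact hr r h1
    · subst h1
      rw [List.length_set, List.getD_eq_getElem g [] hx]
      exact hr _ (List.getElem_mem hx)
  · rw [List.set_eq_of_length_le (by omega)]
    exact ⟨hl, hr⟩

theorem colN_gridSet_ne (g : List (List (Option Char))) (x y y' : Nat) (v : Option Char)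
    (hne : y' ≠ y) : colN (gridSet g (x : Int) (y : Int) v) y' = colN g y' := by
  rw [gridSet_cast]
  unfold colN
  rw [List.map_set]
  by_cases hx : x < g.length
  · rw [getD_set_ne _ _ _ _ _ (by omega)]
    apply List.ext_getElem (by simp)
    intro i h1 h2
    by_cases hix : i = x
    · subst hix
      rw [List.getElem_set_self, List.getElem_map, List.getD_eq_getElem g [] hx]
    · rw [List.getElem_set_ne (by omega), List.getElem_map]
  · rw [List.set_eq_of_length_le (by simpa using Nat.le_of_not_lt hx)]

theorem colN_gridSet_self {g : List (List (Option Char))} {M N : Nat} (h : Dims g M N)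
    (x y : Nat) (v : Option Char) (hy : y < N) :
    colN (gridSet g (x : Int) (y : Int) v) y = (colN g y).set x v := by
  rw [gridSet_cast]
  unfold colN
  rw [List.map_set]
  by_cases hx : x < g.length
  · have hrow : g.getD x [] = g[x] := List.getD_eq_getElem g [] hx
    have hrl : g[x].length = N := h.2 _ (List.getElem_mem hx)
    rw [hrow, getD_set_self _ _ _ _ (hrl ▸ hy)]
  · rw [List.set_eq_of_length_le (by simp only [List.length_map]; omega), List.set_eq_of_length_le (by simpa using Nat.le_of_not_lt hx)]

theorem getN_gridSet {g : List (List (Option Char))} {M N : Nat} (h : Dims g M N)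
    (a b x y : Nat) (v : Option Char) (ha : a < M) (hb : b < N) (hy : y < N) :
    getN (gridSet g (a : Int) (b : Int) v) x y = if a = x ∧ b = y then v else getN g x y := by
  by_cases hby : b = y
  · subst hby
    rw [getN_col, getN_col, colN_gridSet_self h _ _ _ hb]
    by_cases hax : a = x
    · subst hax
      rw [getD_set_self _ _ _ _ (by rw [length_colN, h.1]; omega)]; simp
    · rw [getD_set_ne _ _ _ _ _ (by omega)]; simp [hax]
  · rw [getN_col, getN_col, colN_gridSet_ne _ _ _ _ _ (by omega)]
    have hne : ¬(a = x ∧ b = y) := fun h' => hby h'.2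
    simp [hne]

theorem grid_ext {g g' : List (List (Option Char))} {M N : Nat}
    (h1 : Dims g M N) (h2 : Dims g' M N)
    (h : ∀ x < M, ∀ y < N, getN g x y = getN g' x y) : g = g' := by
  apply List.ext_getElem (by rw [h1.1, h2.1])
  intro x hx hx'
  have hxM : x < M := by rw [← h1.1]; exact hx
  apply List.ext_getElem
  · rw [h1.2 _ (List.getElem_mem hx), h2.2 _ (List.getElem_mem hx')]
  · intro y hy hy'
    have hyN : y < N := by rw [← h1.2 _ (List.getElem_mem hx)]; exact hy
    have := h x hxM y hyN
    unfold getN at this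
    rw [List.getD_eq_getElem g [] hx, List.getD_eq_getElem g' [] hx'] at this
    rw [List.getD_eq_getElem _ none hy, List.getD_eq_getElem _ none hy'] at this
    exact this

-- clearCells helpers (definitions of ports pasted in final file; here assume defs from frag1 + ports)

theorem dims_clearCells {M N : Nat} (L : List (Int × Int)) (g : List (List (Option Char)))
    (h : Dims g M N)
    (hL : ∀ p ∈ L, ∃ a b : Nat, p = ((a : Int), (b : Int)) ∧ a < M ∧ b < N) :
    Dims (clearCells L g) M N := by
  induction L generalizing g with
  | nil => simpa [clearCells] using h
  | cons p t ih =>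
      obtain ⟨a, b, hp, ha, hb⟩ := hL p (by simp)
      have : clearCells (p :: t) g = clearCells t (gridSet g p.1 p.2 none) := rfl
      rw [this, hp]
      exact ih _ (dims_gridSet h a b none) (fun q hq => hL q (by simp [hq]))

theorem getN_clearCells {M N : Nat} (L : List (Int × Int)) (g : List (List (Option Char)))
    (h : Dims g M N)
    (hL : ∀ p ∈ L, ∃ a b : Nat, p = ((a : Int), (b : Int)) ∧ a < M ∧ b < N)
    (x y : Nat) (hx : x < M) (hy : y < N) :
    getN (clearCells L g) x y = if ((x : Int), (y : Int)) ∈ L then none else getN g x y := by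
  induction L generalizing g with
  | nil => simp [clearCells]
  | cons p t ih =>
      obtain ⟨a, b, hp, ha, hb⟩ := hL p (by simp)
      have hstep : clearCells (p :: t) g = clearCells t (gridSet g p.1 p.2 none) := rfl
      rw [hstep, hp]
      rw [ih _ (dims_gridSet h a b none) (fun q hq => hL q (by simp [hq]))]
      rw [getN_gridSet h a b x y none ha hb hy]
      have hpair : (((x:Int),(y:Int)) = ((a:Int),(b:Int))) ↔ (a = x ∧ b = y) := by
        constructor
        · intro hc
          have h1 := congrArg Prod.fst hc
          have h2 := congrArg Prod.snd hc
          simp at h1 h2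
          omega
        · rintro ⟨rfl, rfl⟩; rfl
      by_cases hmem : ((x : Int), (y : Int)) ∈ t
      · simp [hmem]
      · by_cases heq : a = x ∧ b = y
        · simp [heq, List.mem_cons, hpair.mpr heq]
        · have hne : ¬((x:Int),(y:Int)) = ((a:Int),(b:Int)) := fun hc => heq (hpair.mp hc)
          simp [heq, List.mem_cons, hne, hmem]

-- clearCells depends only on membership of the list
theorem clearCells_eq_of_mem_iff {M N : Nat} (L L' : List (Int × Int)) (g : List (List (Option Char)))
    (h : Dims g M N)
    (hL : ∀ p ∈ L, ∃ a b : Nat, p = ((a : Int), (b : Int)) ∧ a < M ∧ b < N)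
    (hL' : ∀ p ∈ L', ∃ a b : Nat, p = ((a : Int), (b : Int)) ∧ a < M ∧ b < N)
    (hiff : ∀ p, p ∈ L ↔ p ∈ L') :
    clearCells L g = clearCells L' g := by
  apply grid_ext (dims_clearCells L g h hL) (dims_clearCells L' g h hL')
  intro x hx y hy
  rw [getN_clearCells L g h hL x y hx hy, getN_clearCells L' g h hL' x y hx hy, ]
  by_cases hm : ((x:Int),(y:Int)) ∈ L
  · simp [hm, (hiff _).1 hm]
  · have hm' : ((x:Int),(y:Int)) ∉ L' := fun hc => hm ((hiff _).2 hc)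
    simp [hm, hm']



-- generic membership / nodup of the nested if-update fold that builds A's erase set
theorem mem_foldl_update {α β : Type} [BEq β] [LawfulBEq β] (l : List α) (P : α → Prop)
    [DecidablePred P] (f : α → List β) (s : PySem.Set β) (y : β) :
    (y ∈ l.foldl (fun s x => if P x then PySem.Set.update s (f x) else s) s) ↔
      y ∈ s ∨ ∃ x ∈ l, P x ∧ y ∈ f x := by
  induction l generalizing s with
  | nil => simp
  | cons a t ih =>
      simp only [List.foldl_cons, ih]
      by_cases hp : P a
      · simp only [if_pos hp, PySem.Set.mem_update, List.exists_mem_cons_iff]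
        tauto
      · simp only [if_neg hp, List.exists_mem_cons_iff]
        tauto

theorem nodup_foldl_update {α β : Type} [BEq β] [LawfulBEq β] (l : List α) (P : α → Prop)
    [DecidablePred P] (f : α → List β) (s : PySem.Set β) (hs : s.Nodup) :
    (l.foldl (fun s x => if P x then PySem.Set.update s (f x) else s) s).Nodup := by
  induction l generalizing s with
  | nil => simpa
  | cons a t ih =>
      simp only [List.foldl_cons]
      by_cases hp : P a
      · simp only [hp, if_pos]
        exact ih _ (PySem.Set.nodup_update s (f a) hs)
      · simp only [hp, if_neg, not_false_iff]
        exact ih _ hs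

theorem mem_foldl_update2 {α α' β : Type} [BEq β] [LawfulBEq β] (I : List α) (J : List α')
    (P : α → α' → Prop) [∀ a b, Decidable (P a b)] (f : α → α' → List β) (s : PySem.Set β) (y : β) :
    (y ∈ I.foldl (fun s i => J.foldl (fun s j => if P i j then PySem.Set.update s (f i j) else s) s) s) ↔
      y ∈ s ∨ ∃ i ∈ I, ∃ j ∈ J, P i j ∧ y ∈ f i j := by
  induction I generalizing s with
  | nil => simp
  | cons a t ih =>
      simp only [List.foldl_cons, ih, mem_foldl_update, List.exists_mem_cons_iff]
      exact or_assoc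

theorem nodup_foldl_update2 {α α' β : Type} [BEq β] [LawfulBEq β] (I : List α) (J : List α')
    (P : α → α' → Prop) [∀ a b, Decidable (P a b)] (f : α → α' → List β) (s : PySem.Set β)
    (hs : s.Nodup) :
    (I.foldl (fun s i => J.foldl (fun s j => if P i j then PySem.Set.update s (f i j) else s) s) s).Nodup := by
  induction I generalizing s with
  | nil => simpa
  | cons a t ih =>
      simp only [List.foldl_cons]
      exact ih _ (nodup_foldl_update J (P a) (f a) s hs)

-- A's erase guard, as written in the port
def guardA (g : List (List (Option Char))) (i j : Int) : Prop :=
  (gridGet g i j).isSome ∧ gridGet g (i-1) (j-1) = gridGet g (i-1) j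
    ∧ gridGet g (i-1) j = gridGet g i (j-1) ∧ gridGet g i (j-1) = gridGet g i j

theorem mem_eraseSet (m n : Int) (g : List (List (Option Char))) (p : Int × Int) :
    p ∈ eraseSet m n g ↔
      ∃ i, (1 ≤ i ∧ i < m) ∧ ∃ j, (1 ≤ j ∧ j < n) ∧ guardA g i j ∧
        (p = (i, j) ∨ p = (i-1, j) ∨ p = (i, j-1) ∨ p = (i-1, j-1)) := by
  unfold eraseSet
  rw [show (PySem.Set.empty : PySem.Set (Int × Int)) = [] from rfl]
  rw [mem_foldl_update2 _ _
      (fun i j => (gridGet g i j).isSome = true ∧ gridGet g (i-1) (j-1) = gridGet g (i-1) j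
        ∧ gridGet g (i-1) j = gridGet g i (j-1) ∧ gridGet g i (j-1) = gridGet g i j)
      (fun i j => [(i, j), (i-1, j), (i, j-1), (i-1, j-1)])]
  simp only [PySem.List.mem_pyRange_one, List.not_mem_nil, false_or, List.mem_cons,
    List.not_mem_nil, or_false, guardA]

theorem nodup_eraseSet (m n : Int) (g : List (List (Option Char))) :
    (eraseSet m n g).Nodup := by
  unfold eraseSet
  exact nodup_foldl_update2 _ _
    (fun i j => (gridGet g i j).isSome = true ∧ gridGet g (i-1) (j-1) = gridGet g (i-1) j
      ∧ gridGet g (i-1) j = gridGet g i (j-1) ∧ gridGet g i (j-1) = gridGet g i j)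
    (fun i j => [(i, j), (i-1, j), (i, j-1), (i-1, j-1)]) _ List.nodup_nil

theorem mem_cellsB (m n : Int) (g : List (List (Option Char))) (p : Int × Int) :
    p ∈ cellsB m n g ↔
      ∃ i, (0 ≤ i ∧ i < m - 1) ∧ ∃ j, (0 ≤ j ∧ j < n - 1) ∧ blockMatchB g i j = true ∧
        (p = (i, j) ∨ p = (i, j+1) ∨ p = (i+1, j) ∨ p = (i+1, j+1)) := by
  unfold cellsB blocksB
  rw [PySem.Set.mem_ofList]
  simp only [List.mem_flatMap, List.mem_map, List.mem_filter, PySem.List.mem_pyRange_one,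
    List.mem_cons, List.not_mem_nil, or_false]
  constructor
  · rintro ⟨q, ⟨i, hi, j, ⟨hj, hb⟩, rfl⟩, hp⟩
    exact ⟨i, hi, j, hj, hb, hp⟩
  · rintro ⟨i, hi, j, hj, hb, hp⟩
    exact ⟨(i, j), ⟨i, hi, j, ⟨hj, hb⟩, rfl⟩, hp⟩

theorem nodup_cellsB (m n : Int) (g : List (List (Option Char))) : (cellsB m n g).Nodup :=
  PySem.Set.nodup_ofList _

-- the two guards pick out the same 2x2 blocks (A anchors at the bottom-right corner,
-- B at the top-left corner)
theorem guard_iff (g : List (List (Option Char))) (i j : Int) :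
    guardA g i j ↔ blockMatchB g (i-1) (j-1) = true := by
  unfold guardA blockMatchB
  have e1 : i - 1 + 1 = i := by omega
  have e2 : j - 1 + 1 = j := by omega
  rw [e1, e2]
  simp only [Bool.and_eq_true, beq_iff_eq]
  constructor
  · rintro ⟨h0, h1, h2, h3⟩
    exact ⟨⟨⟨by rw [h1, h2, h3]; exact h0, h1⟩, h2⟩, h3⟩
  · rintro ⟨⟨⟨h0, h1⟩, h2⟩, h3⟩
    exact ⟨by rw [← h3, ← h2, ← h1]; exact h0, h1, h2, h3⟩

theorem mem_eraseSet_iff_cellsB (m n : Int) (g : List (List (Option Char))) (p : Int × Int) :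
    p ∈ eraseSet m n g ↔ p ∈ cellsB m n g := by
  rw [mem_eraseSet, mem_cellsB]
  constructor
  · rintro ⟨i, hi, j, hj, hg, hp⟩
    refine ⟨i - 1, by omega, j - 1, by omega, (guard_iff g i j).mp hg, ?_⟩
    have e1 : i - 1 + 1 = i := by omega
    have e2 : j - 1 + 1 = j := by omega
    rw [e1, e2]
    tauto
  · rintro ⟨i, hi, j, hj, hg, hp⟩
    refine ⟨i + 1, by omega, j + 1, by omega, ?_, ?_⟩
    · have := (guard_iff g (i+1) (j+1)).mpr
      simp only [add_sub_cancel_right] at this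
      exact this hg
    · simp only [add_sub_cancel_right]
      tauto


def keptOf (c : List (Option Char)) : List (Option Char) := c.filter (fun v => v.isSome)

def compactC (c : List (Option Char)) : List (Option Char) :=
  List.replicate (c.length - (keptOf c).length) none ++ keptOf c

def colWhile (m : Int) (c : List (Option Char)) (i : Int) : Int → Nat → Int
  | k, 0 => k
  | k, fuel+1 =>
      if (PySem.List.pyGetD c (i+k) none).isSome then k
      else if i + (k+1) > m - 1 then k + 1
      else colWhile m c i (k+1) fuel

def colStepF (m : Int) (c : List (Option Char)) (i : Int) : List (Option Char) :=
  if (PySem.List.pyGetD c i none).isSome ∧ PySem.List.pyGetD c (i+1) none = none then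
    let k := colWhile m c i 1 (m - i).toNat
    PySem.List.pySetD (PySem.List.pySetD c i (PySem.List.pyGetD c (i+k-1) none)) (i+k-1)
      (PySem.List.pyGetD c i none)
  else c

theorem length_keptOf_le (c : List (Option Char)) : (keptOf c).length ≤ c.length :=
  List.length_filter_le _ _

theorem length_compactC (c : List (Option Char)) : (compactC c).length = c.length := by
  simp [compactC]
  have := length_keptOf_le c
  omega

theorem keptOf_cons_none (c : List (Option Char)) : keptOf (none :: c) = keptOf c := by
  simp [keptOf]

theorem keptOf_cons_some (c : List (Option Char)) (v : Char) :
    keptOf (some v :: c) = some v :: keptOf c := by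
  simp [keptOf]

theorem compactC_cons_none (c : List (Option Char)) :
    compactC (none :: c) = none :: compactC c := by
  simp only [compactC, keptOf_cons_none, List.length_cons]
  have := length_keptOf_le c
  rw [show c.length + 1 - (keptOf c).length = (c.length - (keptOf c).length) + 1 by omega]
  rw [List.replicate_succ]
  simp

theorem compactC_short (c : List (Option Char)) (h : c.length ≤ 1) : compactC c = c := by
  match c, h with
  | [], _ => rfl
  | [a], _ =>
      cases a with
      | none => simp [compactC, keptOf]
      | some v => simp [compactC, keptOf]

-- all-kept column: compactC is the identity
theorem compactC_all_some (c : List (Option Char)) (h : (keptOf c).length = c.length) :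
    compactC c = c := by
  unfold compactC
  rw [h]
  simp only [Nat.sub_self, List.replicate_zero, List.nil_append]
  exact List.filter_eq_self.mpr fun a ha => by
    have := List.length_filter_eq_length_iff.mp h
    exact this a ha

theorem getD_middle_none (P K : List (Option Char)) (s u : Nat) (hP : P.length ≤ u)
    (hu : u < P.length + s) :
    (P ++ (List.replicate s none ++ K)).getD u none = none := by
  rw [List.getD_append_right _ _ _ _ hP, List.getD_append _ _ _ _ (by simp; omega)]
  rw [List.getD_eq_getElem _ _ (by simp; omega), List.getElem_replicate]

theorem colWhile_spec (r s : Nat) (P K : List (Option Char)) (hP : P.length = r + 1)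
    (hK : ∀ v ∈ K, v.isSome) (hs : 1 ≤ s) :
    ∀ (fuel q : Nat), 1 ≤ q → q ≤ s + 1 → s + 2 - q ≤ fuel → (q ≤ s ∨ K ≠ []) →
    colWhile ((r + 1 + s + K.length : Nat) : Int) (P ++ (List.replicate s none ++ K)) (r : Int)
      ((q : Nat) : Int) fuel = ((s + 1 : Nat) : Int) := by
  intro fuel
  induction fuel with
  | zero => intro q h1 h2 h3 h4; omega
  | succ fuel ih =>
      intro q h1 h2 h3 h4
      unfold colWhile
      by_cases hq : q ≤ s
      · have hread : PySem.List.pyGetD (P ++ (List.replicate s none ++ K)) ((r : Int) + (q : Int)) none = none := by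
          rw [show (r : Int) + (q : Int) = ((r + q : Nat) : Int) by push_cast; ring]
          rw [PySem.List.pyGetD_natCast]
          exact getD_middle_none P K s (r + q) (by omega) (by omega)
        rw [hread]
        simp only [Option.isSome_none, Bool.false_eq_true, if_false]
        by_cases hbreak : q = s ∧ K = []
        · obtain ⟨hqs, hKnil⟩ := hbreak
          subst hKnil
          rw [if_pos (by simp only [List.length_nil]; push_cast; omega)]
          push_cast [hqs]; ring
        · have hKc : q < s ∨ K ≠ [] := by
            rcases Nat.lt_or_ge q s with h | h
            · exact Or.inl h
            · right; intro hc; exact hbreak ⟨by omega, hc⟩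
          have hlen : r + q + 1 ≤ r + s + K.length := by
            rcases hKc with h | h
            · omega
            · have : 1 ≤ K.length := List.length_pos_iff.mpr h
              omega
          rw [if_neg (by push_cast; omega)]
          rw [show (q : Int) + 1 = ((q + 1 : Nat) : Int) by push_cast; ring]
          refine ih (q + 1) (by omega) (by omega) (by omega) ?_
          rcases hKc with h | h
          · exact Or.inl (by omega)
          · exact Or.inr h
      · have hq1 : q = s + 1 := by omega
        have hKne : K ≠ [] := by tauto
        have hKl : 1 ≤ K.length := List.length_pos_iff.mpr hKne
        have hread : (PySem.List.pyGetD (P ++ (List.replicate s none ++ K)) ((r : Int) + (q : Int)) none).isSome = true := by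
          rw [show (r : Int) + (q : Int) = ((r + q : Nat) : Int) by push_cast; ring]
          rw [PySem.List.pyGetD_natCast]
          rw [List.getD_append_right _ _ _ _ (by omega)]
          rw [List.getD_append_right _ _ _ _ (by simp; omega)]
          rw [List.getD_eq_getElem _ _ (by simp; omega)]
          exact hK _ (List.getElem_mem _)
        rw [if_pos hread, hq1]

theorem colStep_peel (cl : List (Option Char)) (M r : Nat) (hc : cl.length = M)
    (hM : 2 ≤ M) (hr : r ≤ M - 2) :
    colStepF (M : Int) (cl.take (r+1) ++ compactC (cl.drop (r+1))) (r : Int)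
      = cl.take r ++ compactC (cl.drop r) := by
  have hrM : r < M := by omega
  have hr1M : r + 1 ≤ M := by omega
  set d := cl.drop (r+1) with hd
  set K := keptOf d with hKdef
  set s := d.length - K.length with hsdef
  have hdlen : d.length = M - (r+1) := by rw [hd, List.length_drop, hc]
  have hKle : K.length ≤ d.length := length_keptOf_le d
  have htake : (cl.take (r+1)).length = r + 1 := by
    rw [List.length_take]; omega
  have hcompd : compactC d = List.replicate s none ++ K := by rw [compactC, hsdef, hKdef]
  have hdropr : cl.drop r = cl[r] :: d := by
    rw [hd, List.drop_eq_getElem_cons (by omega)]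
  have htakesucc : cl.take (r+1) = cl.take r ++ [cl[r]] := by
    rw [List.take_add_one, List.getElem?_eq_getElem (by omega)]
    rfl
  have hget_r : PySem.List.pyGetD (cl.take (r+1) ++ compactC d) (r : Int) none = cl[r] := by
    rw [PySem.List.pyGetD_natCast, List.getD_append _ _ _ _ (by omega)]
    rw [List.getD_eq_getElem _ _ (by omega), List.getElem_take]
  have hget_r1 : PySem.List.pyGetD (cl.take (r+1) ++ compactC d) ((r : Int) + 1) none
      = (compactC d).getD 0 none := by
    rw [show (r : Int) + 1 = ((r + 1 : Nat) : Int) by push_cast; ring]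
    rw [PySem.List.pyGetD_natCast, List.getD_append_right _ _ _ _ (by omega)]
    rw [htake]
    simp
  rcases hcr : cl[r] with _ | v
  · -- cl[r] = none : the guard is false, nothing falls
    rw [colStepF, if_neg (by rw [hget_r, hcr]; simp)]
    rw [hdropr, hcr, compactC_cons_none, htakesucc, hcr]
    simp
  · -- cl[r] = some v
    by_cases hs0 : s = 0
    · -- everything below r is already packed: no hole below
      have hKlen : K.length = d.length := by omega
      have hcompd' : compactC d = d := compactC_all_some d (by rw [← hKdef]; omega)
      have hdne : d ≠ [] := by
        intro hnil
        rw [hnil] at hdlen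
        simp at hdlen
        omega
      have hall : ∀ v ∈ d, v.isSome := List.length_filter_eq_length_iff.mp (by rw [← keptOf] at *; omega)
      have hhead : (compactC d).getD 0 none = d[0]'(List.length_pos_iff.mpr hdne) := by
        rw [hcompd', List.getD_eq_getElem _ _ (List.length_pos_iff.mpr hdne)]
      rw [colStepF, if_neg ?hneg]
      case hneg =>
        rintro ⟨-, h2⟩
        rw [hget_r1, hhead] at h2
        have hmem0 : d[0]'(List.length_pos_iff.mpr hdne) ∈ d := List.getElem_mem _
        have := hall _ hmem0
        rw [h2] at this
        simp at this
      rw [hcompd', hdropr, hcr]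
      have : compactC (some v :: d) = some v :: d := by
        apply compactC_all_some
        rw [keptOf_cons_some]
        simp only [List.length_cons, ← hKdef]
        omega
      rw [this, htakesucc, hcr]
      simp
    · -- there is a hole just below r: the cell falls to the top of the packed suffix
      have hs1 : 1 ≤ s := by omega
      have hguard : (PySem.List.pyGetD (cl.take (r+1) ++ compactC d) (r : Int) none).isSome = true
          ∧ PySem.List.pyGetD (cl.take (r+1) ++ compactC d) ((r : Int) + 1) none = none := by
        constructor
        · rw [hget_r, hcr]; rfl
        · rw [hget_r1, hcompd]
          rw [List.getD_append _ _ _ _ (by simp; omega)]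
          rw [List.getD_eq_getElem _ _ (by simp; omega), List.getElem_replicate]
      rw [colStepF, if_pos hguard]
      have hMeq : M = r + 1 + s + K.length := by omega
      have hfuel : ((M : Int) - (r : Int)).toNat = M - r := by omega
      have hwalk : colWhile (M : Int) (cl.take (r+1) ++ compactC d) (r : Int) 1 ((M : Int) - (r : Int)).toNat
          = ((s + 1 : Nat) : Int) := by
        rw [hfuel, hcompd]
        have := colWhile_spec r s (cl.take (r+1)) K htake
          (fun v hv => List.of_mem_filter hv) hs1 (M - r) 1 (by omega) (by omega) (by omega)
          (Or.inl hs1)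
        rw [hMeq]
        rw [show ((1:Nat):Int) = (1:Int) from rfl] at this
        convert this using 2
        omega
      rw [hwalk]
      show PySem.List.pySetD
          (PySem.List.pySetD (List.take (r+1) cl ++ compactC d) (r : Int)
            (PySem.List.pyGetD (List.take (r+1) cl ++ compactC d) ((r : Int) + ((s + 1 : Nat) : Int) - 1) none))
          ((r : Int) + ((s + 1 : Nat) : Int) - 1)
          (PySem.List.pyGetD (List.take (r+1) cl ++ compactC d) (r : Int) none)
        = List.take r cl ++ compactC (List.drop r cl)
      -- the two writes: position r becomes empty, position r+s receives the value
      have hidx : (r : Int) + ((s + 1 : Nat) : Int) - 1 = ((r + s : Nat) : Int) := by push_cast; ring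
      have hread_rs : PySem.List.pyGetD (cl.take (r+1) ++ compactC d) ((r + s : Nat) : Int) none = none := by
        rw [PySem.List.pyGetD_natCast, hcompd]
        exact getD_middle_none _ _ _ _ (by omega) (by simp; omega)
      rw [hidx, hread_rs, hget_r, hcr]
      rw [PySem.List.pySetD_natCast, PySem.List.pySetD_natCast]
      rw [hcompd, htakesucc, hcr]
      -- ((take r ++ [some v]) ++ (replicate s none ++ K)).set r none = take r ++ (replicate (s+1) none ++ K)
      rw [show ((cl.take r ++ [some v]) ++ (List.replicate s none ++ K))
            = cl.take r ++ (some v :: (List.replicate s none ++ K)) by simp]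
      rw [List.set_append_right _ _ (by rw [List.length_take]; omega)]
      rw [show r - (cl.take r).length = 0 by rw [List.length_take]; omega]
      rw [List.set_cons_zero]
      rw [List.set_append_right _ _ (by rw [List.length_take]; omega)]
      rw [show r + s - (cl.take r).length = s by rw [List.length_take]; omega]
      rw [show (none :: (List.replicate s none ++ K)).set s (some v)
            = List.replicate s none ++ (some v :: K) by
        rw [show (none :: (List.replicate s none ++ K)) = List.replicate (s+1) none ++ K by
          rw [List.replicate_succ]; simp]
        rw [List.set_append_left _ _ (by simp)]
        rw [show (List.replicate (s+1) none).set s (some v)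
              = List.replicate s none ++ [some v] by
          rw [List.replicate_succ']
          rw [List.set_append_right _ _ (by simp)]
          simp]
        simp]
      -- right-hand side
      rw [hdropr, hcr]
      rw [show compactC (some v :: d) = List.replicate s none ++ (some v :: K) by
        rw [compactC, keptOf_cons_some, ← hKdef]
        simp only [List.length_cons]
        rw [show d.length + 1 - (K.length + 1) = s by omega]]

theorem colfold_inv (M : Nat) (cl : List (Option Char)) (hc : cl.length = M) :
    ∀ t, t ≤ M - 1 →
    (List.range t).foldl (fun c (k : Nat) => colStepF (M : Int) c ((M : Int) - 2 - (k : Int))) cl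
      = cl.take (M - 1 - t) ++ compactC (cl.drop (M - 1 - t)) := by
  intro t
  induction t with
  | zero =>
      intro _
      rw [List.range_zero, List.foldl_nil]
      rw [compactC_short _ (by rw [List.length_drop]; omega)]
      rw [List.take_append_drop]
  | succ t ih =>
      intro ht
      have hM2 : 2 ≤ M := by omega
      have htM : t ≤ M - 2 := by omega
      rw [List.range_succ, List.foldl_append, List.foldl_cons, List.foldl_nil]
      rw [ih (by omega)]
      have hidx : (M : Int) - 2 - (t : Int) = ((M - 2 - t : Nat) : Int) := by omega
      have hsub : M - 1 - t = (M - 2 - t) + 1 := by omega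
      have hsub2 : M - 1 - (t + 1) = M - 2 - t := by omega
      rw [hidx, hsub, hsub2]
      exact colStep_peel cl M (M - 2 - t) hc hM2 (by omega)

theorem colDrop_compact (M : Nat) (cl : List (Option Char)) (hc : cl.length = M) :
    (List.range ((M : Int) - 1).toNat).foldl
        (fun c (k : Nat) => colStepF (M : Int) c ((M : Int) - 2 - (k : Int))) cl
      = compactC cl := by
  rcases Nat.eq_zero_or_pos M with hM | hM
  · subst hM
    have : cl = [] := List.length_eq_zero_iff.mp hc
    subst this
    rfl
  · have h1 : ((M : Int) - 1).toNat = M - 1 := by omega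
    rw [h1, colfold_inv M cl hc (M - 1) le_rfl]
    simp


-- A's gravity written with a named per-cell step (definitionally equal to the port)
def stepG (m : Int) (g : List (List (Option Char))) (i j : Int) : List (List (Option Char)) :=
  if (gridGet g i j).isSome ∧ gridGet g (i+1) j = none then
    let k := gravWhile m g i j 1 (m - i).toNat
    gridSet (gridSet g i j (gridGet g (i+k-1) j)) (i+k-1) j (gridGet g i j)
  else g

theorem gravityA_eq (m n : Int) (nb : List (List (Option Char))) :
    gravityA m n nb = (PySem.List.pyRange (m-2) (-1) (-1)).foldl
      (fun g i => (PySem.List.pyRange 0 n 1).foldl (fun g j => stepG m g i j) g) nb := rfl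

theorem colWhile_ge (m : Int) (c : List (Option Char)) (i : Int) :
    ∀ fuel k, k ≤ colWhile m c i k fuel := by
  intro fuel
  induction fuel with
  | zero => intro k; simp [colWhile]
  | succ fuel ih =>
      intro k
      unfold colWhile
      split_ifs
      · omega
      · omega
      · have := ih (k + 1)
        omega

theorem gravWhile_col (m : Int) (g : List (List (Option Char))) (i : Int) (j : Nat) :
    ∀ fuel k, gravWhile m g i (j : Int) k fuel = colWhile m (colN g j) i k fuel := by
  intro fuel
  induction fuel with
  | zero => intro k; rfl
  | succ fuel ih =>
      intro k
      unfold gravWhile colWhile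
      rw [gridGet_col]
      split_ifs
      · rfl
      · rfl
      · exact ih (k + 1)

theorem dims_gridSet' {g : List (List (Option Char))} {M N : Nat} (h : Dims g M N)
    (a b : Int) (ha : 0 ≤ a) (hb : 0 ≤ b) (v : Option Char) : Dims (gridSet g a b v) M N := by
  rw [← Int.toNat_of_nonneg ha, ← Int.toNat_of_nonneg hb]
  exact dims_gridSet h _ _ v

theorem colN_gridSet_ne' (g : List (List (Option Char))) (a : Int) (ha : 0 ≤ a)
    (y y' : Nat) (v : Option Char) (hne : y' ≠ y) :
    colN (gridSet g a (y : Int) v) y' = colN g y' := by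
  rw [← Int.toNat_of_nonneg ha]
  exact colN_gridSet_ne g _ y y' v hne

theorem colN_gridSet_self' {g : List (List (Option Char))} {M N : Nat} (h : Dims g M N)
    (a : Int) (ha : 0 ≤ a) (y : Nat) (v : Option Char) (hy : y < N) :
    colN (gridSet g a (y : Int) v) y = PySem.List.pySetD (colN g y) a v := by
  rw [← Int.toNat_of_nonneg ha, colN_gridSet_self h _ _ _ hy, PySem.List.pySetD_natCast]

theorem colN_stepG {g : List (List (Option Char))} {M N : Nat} (m : Int) (h : Dims g M N)
    (i : Int) (hi : 0 ≤ i) (j : Nat) (hj : j < N) :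
    Dims (stepG m g i (j : Int)) M N
      ∧ colN (stepG m g i (j : Int)) j = colStepF m (colN g j) i
      ∧ ∀ y, y ≠ j → colN (stepG m g i (j : Int)) y = colN g y := by
  unfold stepG colStepF
  rw [gridGet_col g i j, gridGet_col g (i+1) j]
  split_ifs with hg
  · have hk := colWhile_ge m (colN g j) i ((m - i).toNat) 1
    rw [show gravWhile m g i (j : Int) 1 (m - i).toNat
          = colWhile m (colN g j) i 1 (m - i).toNat from gravWhile_col m g i j _ 1]
    set K := colWhile m (colN g j) i 1 (m - i).toNat with hK
    have hik : 0 ≤ i + K - 1 := by omega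
    have hd1 : Dims (gridSet g i (j : Int) (gridGet g (i+K-1) (j : Int))) M N :=
      dims_gridSet' h i (j : Int) hi (by positivity) _
    refine ⟨dims_gridSet' hd1 _ (j : Int) hik (by positivity) _, ?_, ?_⟩
    · rw [colN_gridSet_self' hd1 _ hik _ _ hj, colN_gridSet_self' h i hi _ _ hj,
        gridGet_col g (i+K-1) j]
    · intro y hy
      rw [colN_gridSet_ne' _ _ hik _ _ _ hy, colN_gridSet_ne' _ _ hi _ _ _ hy]
  · exact ⟨h, rfl, fun y _ => rfl⟩


theorem rowPass_inv (m : Int) {M N : Nat} (i : Int) (hi : 0 ≤ i)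
    (g : List (List (Option Char))) (h : Dims g M N) :
    ∀ u, u ≤ N →
      Dims ((List.range u).foldl (fun g (j : Nat) => stepG m g i (j : Int)) g) M N
      ∧ (∀ y, y < u → colN ((List.range u).foldl (fun g (j : Nat) => stepG m g i (j : Int)) g) y
          = colStepF m (colN g y) i)
      ∧ (∀ y, u ≤ y → colN ((List.range u).foldl (fun g (j : Nat) => stepG m g i (j : Int)) g) y
          = colN g y) := by
  intro u
  induction u with
  | zero => exact fun _ => ⟨h, fun y hy => absurd hy (by omega), fun y _ => rfl⟩
  | succ u ih =>
      intro hu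
      obtain ⟨hd, hlt, hge⟩ := ih (by omega)
      rw [List.range_succ, List.foldl_append, List.foldl_cons, List.foldl_nil]
      obtain ⟨hd', hcol', hne'⟩ := colN_stepG m hd i hi u (by omega)
      refine ⟨hd', ?_, ?_⟩
      · intro y hy
        by_cases hyu : y = u
        · subst hyu
          rw [hcol', hge y le_rfl]
        · rw [hne' y hyu, hlt y (by omega)]
      · intro y hy
        rw [hne' y (by omega), hge y (by omega)]

theorem gravityA_cols {M N : Nat} (g : List (List (Option Char))) (h : Dims g M N) :
    Dims (gravityA (M : Int) (N : Int) g) M N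
      ∧ ∀ y, y < N → colN (gravityA (M : Int) (N : Int) g) y = compactC (colN g y) := by
  rw [gravityA_eq, PySem.List.pyRange_neg_one, List.foldl_map]
  have hT : ((M : Int) - 2 - (-1)).toNat = ((M : Int) - 1).toNat := by omega
  rw [hT]
  have hinner : ∀ (g' : List (List (Option Char))) (i : Int),
      (PySem.List.pyRange 0 (N : Int) 1).foldl (fun g j => stepG (M : Int) g i j) g'
        = (List.range N).foldl (fun g (j : Nat) => stepG (M : Int) g i (j : Int)) g' := by
    intro g' i
    rw [PySem.List.pyRange_zero_natCast, List.foldl_map]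
  have main : ∀ t, t ≤ ((M : Int) - 1).toNat →
      Dims ((List.range t).foldl (fun g (k : Nat) =>
          (PySem.List.pyRange 0 (N : Int) 1).foldl
            (fun g j => stepG (M : Int) g ((M : Int) - 2 - (k : Int)) j) g) g) M N
      ∧ ∀ y, y < N → colN ((List.range t).foldl (fun g (k : Nat) =>
          (PySem.List.pyRange 0 (N : Int) 1).foldl
            (fun g j => stepG (M : Int) g ((M : Int) - 2 - (k : Int)) j) g) g) y
        = (List.range t).foldl (fun c (k : Nat) => colStepF (M : Int) c ((M : Int) - 2 - (k : Int)))
            (colN g y) := by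
    intro t
    induction t with
    | zero => exact fun _ => ⟨h, fun y _ => rfl⟩
    | succ t ih =>
        intro ht
        obtain ⟨hd, hcols⟩ := ih (by omega)
        have hi : (0 : Int) ≤ (M : Int) - 2 - (t : Int) := by omega
        rw [List.range_succ, List.foldl_append, List.foldl_cons, List.foldl_nil, hinner]
        obtain ⟨hd', hlt, -⟩ := rowPass_inv (M : Int) ((M : Int) - 2 - (t : Int)) hi _ hd N le_rfl
        refine ⟨hd', ?_⟩
        intro y hy
        rw [hlt y hy, hcols y hy, List.foldl_append, List.foldl_cons, List.foldl_nil]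
  obtain ⟨hd, hcols⟩ := main _ le_rfl
  refine ⟨hd, ?_⟩
  intro y hy
  rw [hcols y hy]
  exact colDrop_compact M (colN g y) (by rw [length_colN, h.1])



theorem keptB_eq {g : List (List (Option Char))} {M N : Nat} (h : Dims g M N) (j : Nat) :
    ((PySem.List.pyRange 0 (M : Int) 1).filter (fun i => (gridGet g i (j : Int)).isSome)).map
        (fun i => gridGet g i (j : Int))
      = keptOf (colN g j) := by
  simp only [gridGet_col]
  unfold keptOf
  have hlen : ((colN g j).length : Int) = (M : Int) := by rw [length_colN, h.1]
  conv_rhs => rw [← PySem.List.map_pyGetD_pyRange_zero' (colN g j) none]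
  rw [List.filter_map]
  rw [hlen]
  rfl

theorem writeCol_main {g : List (List (Option Char))} {M N : Nat} (h : Dims g M N)
    (j : Nat) (hj : j < N) (valF : Nat → Option Char) :
    ∀ u, u ≤ M →
      Dims ((List.range u).foldl (fun g' (x : Nat) => gridSet g' (x : Int) (j : Int) (valF x)) g) M N
      ∧ colN ((List.range u).foldl (fun g' (x : Nat) => gridSet g' (x : Int) (j : Int) (valF x)) g) j
          = (List.range u).map valF ++ (colN g j).drop u
      ∧ ∀ y, y ≠ j → colN ((List.range u).foldl (fun g' (x : Nat) => gridSet g' (x : Int) (j : Int) (valF x)) g) y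
          = colN g y := by
  have hcl : (colN g j).length = M := by rw [length_colN, h.1]
  intro u
  induction u with
  | zero => exact fun _ => ⟨h, by simp, fun y _ => rfl⟩
  | succ u ih =>
      intro hu
      obtain ⟨hd, hcol, hne⟩ := ih (by omega)
      rw [List.range_succ, List.foldl_append, List.foldl_cons, List.foldl_nil]
      refine ⟨dims_gridSet' hd _ _ (by positivity) (by positivity) _, ?_, ?_⟩
      · rw [colN_gridSet_self' hd _ (by positivity) _ _ hj, PySem.List.pySetD_natCast, hcol]
        rw [List.set_append_right _ _ (by simp)]
        rw [show u - ((List.range u).map valF).length = 0 by simp]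
        rw [List.drop_eq_getElem_cons (by omega), List.set_cons_zero]
        rw [List.map_append, List.map_cons, List.map_nil]
        simp
      · intro y hy
        rw [colN_gridSet_ne' _ _ (by positivity) _ _ _ hy, hne y hy]

theorem compactColumn_cols {g : List (List (Option Char))} {M N : Nat} (h : Dims g M N)
    (j : Nat) (hj : j < N) :
    Dims (compactColumn (M : Int) (j : Int) g) M N
      ∧ colN (compactColumn (M : Int) (j : Int) g) j = compactC (colN g j)
      ∧ ∀ y, y ≠ j → colN (compactColumn (M : Int) (j : Int) g) y = colN g y := by
  have hcl : (colN g j).length = M := by rw [length_colN, h.1]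
  have htM : (keptOf (colN g j)).length ≤ M := by rw [← hcl]; exact length_keptOf_le _
  have heq : compactColumn (M : Int) (j : Int) g
      = (List.range M).foldl (fun g' (x : Nat) => gridSet g' (x : Int) (j : Int)
          (if (M : Int) - ((keptOf (colN g j)).length : Int) ≤ (x : Int)
           then PySem.List.pyGetD (keptOf (colN g j))
             ((x : Int) - (M : Int) + ((keptOf (colN g j)).length : Int)) none
           else none)) g := by
    unfold compactColumn
    rw [keptB_eq h j, PySem.List.pyRange_zero_natCast, List.foldl_map]
  rw [heq]
  obtain ⟨hd, hcol, hne⟩ := writeCol_main h j hj _ M le_rfl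
  refine ⟨hd, ?_, hne⟩
  rw [hcol, List.drop_of_length_le (by omega), List.append_nil]
  apply List.ext_getElem (by simp [length_compactC, hcl])
  intro x hx hx'
  have hxM : x < M := by simpa using hx
  rw [List.getElem_map, List.getElem_range]
  unfold compactC
  set t := (keptOf (colN g j)).length with ht
  by_cases hcase : M - t ≤ x
  · rw [if_pos (by omega)]
    rw [List.getElem_append_right (by simp [hcl]; omega)]
    rw [show ((x : Nat) : Int) - (M : Int) + ((t : Nat) : Int) = (((x - (M - t)) : Nat) : Int) by omega]
    rw [PySem.List.pyGetD_natCast, List.getD_eq_getElem _ _ (by omega)]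
    congr 1
    rw [List.length_replicate, ← ht, hcl]
  · rw [if_neg (by omega)]
    rw [List.getElem_append_left (by simp [hcl]; omega), List.getElem_replicate]

theorem gravB_cols {g : List (List (Option Char))} {M N : Nat} (h : Dims g M N) :
    Dims ((PySem.List.pyRange 0 (N : Int) 1).foldl (fun g j => compactColumn (M : Int) j g) g) M N
      ∧ ∀ y, y < N →
        colN ((PySem.List.pyRange 0 (N : Int) 1).foldl (fun g j => compactColumn (M : Int) j g) g) y
          = compactC (colN g y) := by
  rw [PySem.List.pyRange_zero_natCast, List.foldl_map]
  have main : ∀ u, u ≤ N →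
      Dims ((List.range u).foldl (fun g (j : Nat) => compactColumn (M : Int) (j : Int) g) g) M N
      ∧ (∀ y, y < u → colN ((List.range u).foldl (fun g (j : Nat) => compactColumn (M : Int) (j : Int) g) g) y
          = compactC (colN g y))
      ∧ (∀ y, u ≤ y → colN ((List.range u).foldl (fun g (j : Nat) => compactColumn (M : Int) (j : Int) g) g) y
          = colN g y) := by
    intro u
    induction u with
    | zero => exact fun _ => ⟨h, fun y hy => absurd hy (by omega), fun y _ => rfl⟩
    | succ u ih =>
        intro hu
        obtain ⟨hd, hlt, hge⟩ := ih (by omega)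
        rw [List.range_succ, List.foldl_append, List.foldl_cons, List.foldl_nil]
        obtain ⟨hd', hcol', hne'⟩ := compactColumn_cols hd u (by omega)
        refine ⟨hd', ?_, ?_⟩
        · intro y hy
          by_cases hyu : y = u
          · subst hyu
            rw [hcol', hge y le_rfl]
          · rw [hne' y hyu, hlt y (by omega)]
        · intro y hy
          rw [hne' y (by omega), hge y (by omega)]
  obtain ⟨hd, hlt, -⟩ := main N le_rfl
  exact ⟨hd, hlt⟩


theorem eraseSet_coords {M N : Nat} (g : List (List (Option Char))) :
    ∀ p ∈ eraseSet (M : Int) (N : Int) g,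
      ∃ a b : Nat, p = ((a : Int), (b : Int)) ∧ a < M ∧ b < N := by
  intro p hp
  rw [mem_eraseSet] at hp
  obtain ⟨i, hi, j, hj, -, hp⟩ := hp
  rcases hp with rfl | rfl | rfl | rfl
  · exact ⟨i.toNat, j.toNat, by rw [Int.toNat_of_nonneg (by omega), Int.toNat_of_nonneg (by omega)],
      by omega, by omega⟩
  · exact ⟨(i-1).toNat, j.toNat, by rw [Int.toNat_of_nonneg (by omega), Int.toNat_of_nonneg (by omega)],
      by omega, by omega⟩
  · exact ⟨i.toNat, (j-1).toNat, by rw [Int.toNat_of_nonneg (by omega), Int.toNat_of_nonneg (by omega)],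
      by omega, by omega⟩
  · exact ⟨(i-1).toNat, (j-1).toNat, by rw [Int.toNat_of_nonneg (by omega), Int.toNat_of_nonneg (by omega)],
      by omega, by omega⟩

theorem cellsB_coords {M N : Nat} (g : List (List (Option Char))) :
    ∀ p ∈ cellsB (M : Int) (N : Int) g,
      ∃ a b : Nat, p = ((a : Int), (b : Int)) ∧ a < M ∧ b < N := by
  intro p hp
  exact eraseSet_coords g p ((mem_eraseSet_iff_cellsB _ _ g p).mpr hp)

theorem loop_eq {M N : Nat} :
    ∀ (fuel : Nat) (g : List (List (Option Char))), Dims g M N → ∀ (a : Int),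
      loopA (M : Int) (N : Int) fuel g a = loopB (M : Int) (N : Int) fuel g a := by
  intro fuel
  induction fuel with
  | zero => intro g _ a; rfl
  | succ fuel ih =>
      intro g hg a
      have hiff := mem_eraseSet_iff_cellsB (M : Int) (N : Int) g
      have hperm : (eraseSet (M : Int) (N : Int) g).Perm (cellsB (M : Int) (N : Int) g) :=
        (List.perm_ext_iff_of_nodup (nodup_eraseSet _ _ g) (nodup_cellsB _ _ g)).mpr hiff
      have hlen : (eraseSet (M : Int) (N : Int) g).length = (cellsB (M : Int) (N : Int) g).length :=
        hperm.length_eq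
      show (let s := eraseSet (M : Int) (N : Int) g
            let erased := PySem.Set.len s
            let nb := clearCells s g
            if erased = 0 then a else loopA (M : Int) (N : Int) fuel (gravityA (M : Int) (N : Int) nb) (a + erased))
        = (let cells := cellsB (M : Int) (N : Int) g
           if cells.isEmpty then a
           else
             let total := a + PySem.Set.len cells
             let g' := clearCells cells g
             let g'' := (PySem.List.pyRange 0 (N : Int) 1).foldl (fun g j => compactColumn (M : Int) j g) g'
             loopB (M : Int) (N : Int) fuel g'' total)
      simp only [PySem.Set.len]
      by_cases hempty : (cellsB (M : Int) (N : Int) g).isEmpty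
      · rw [if_pos hempty]
        rw [if_pos ?_]
        have := List.isEmpty_iff.mp hempty
        rw [hlen, this]
        rfl
      · rw [if_neg hempty]
        rw [if_neg ?hne]
        case hne =>
          intro hc
          apply hempty
          rw [List.isEmpty_iff, ← List.length_eq_zero_iff]
          omega
        have hclear : clearCells (eraseSet (M : Int) (N : Int) g) g
            = clearCells (cellsB (M : Int) (N : Int) g) g :=
          clearCells_eq_of_mem_iff _ _ g hg (eraseSet_coords g) (cellsB_coords g) hiff
        have hd : Dims (clearCells (cellsB (M : Int) (N : Int) g) g) M N :=
          dims_clearCells _ g hg (cellsB_coords g)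
        obtain ⟨hdA, hcA⟩ := gravityA_cols _ hd
        obtain ⟨hdB, hcB⟩ := gravB_cols hd
        have hgrids : gravityA (M : Int) (N : Int) (clearCells (cellsB (M : Int) (N : Int) g) g)
            = (PySem.List.pyRange 0 (N : Int) 1).foldl (fun g j => compactColumn (M : Int) j g)
                (clearCells (cellsB (M : Int) (N : Int) g) g) := by
          apply grid_ext hdA hdB
          intro x hx y hy
          rw [getN_col, getN_col, hcA y hy, hcB y hy]
        rw [hclear, hgrids, hlen]
        exact ih _ (by
          obtain ⟨hdB', -⟩ := gravB_cols hd
          exact hdB') _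

theorem dims_init (board : List String) (N : Nat)
    (hrows : ∀ s ∈ board, s.length = N) :
    Dims (board.map (fun s => s.toList.map some)) board.length N := by
  refine ⟨by simp, ?_⟩
  intro r hr
  rw [List.mem_map] at hr
  obtain ⟨s, hs, rfl⟩ := hr
  rw [List.length_map, String.length_toList]
  exact hrows s hs

-- ===== VERDICT (by name: the statement is the Claim_ definition above) =====
-- on degenerate sizes both programs return 0 without reading the board
theorem eraseSet_degenerate (m n : Int) (g : List (List (Option Char))) (h : m ≤ 1 ∨ n ≤ 1) :
    eraseSet m n g = [] := by
  unfold eraseSet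
  rcases h with h | h
  · rw [PySem.List.pyRange_one_eq_nil h, List.foldl_nil]
    rfl
  · simp only [PySem.List.pyRange_one_eq_nil h, List.foldl_nil]
    rw [PySem.List.foldl_ignore]
    rfl

theorem cellsB_degenerate (m n : Int) (g : List (List (Option Char))) (h : m ≤ 1 ∨ n ≤ 1) :
    cellsB m n g = [] := by
  unfold cellsB blocksB
  rcases h with h | h
  · rw [PySem.List.pyRange_one_eq_nil (by omega : m - 1 ≤ 0), List.flatMap_nil]
    rfl
  · simp only [PySem.List.pyRange_one_eq_nil (by omega : n - 1 ≤ 0), List.filter_nil,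
      List.map_nil]
    rw [show (List.flatMap (fun _ : Int => ([] : List (Int × Int))) (PySem.List.pyRange 0 (m-1) 1))
          = [] by simp]
    rfl

theorem solution_degenerate (m n : Int) (board : List String) (h : m ≤ 1 ∨ n ≤ 1) :
    solution m n board = 0 ∧ solution_alt m n board = 0 := by
  constructor
  · show loopA m n ((m*n).toNat + 1) (board.map (fun s => s.toList.map some)) 0 = 0
    rw [show (m*n).toNat + 1 = Nat.succ ((m*n).toNat) from rfl]
    show (let s := eraseSet m n (board.map (fun s => s.toList.map some))
          let erased := PySem.Set.len s
          let nb := clearCells s (board.map (fun s => s.toList.map some))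
          if erased = 0 then 0
          else loopA m n ((m*n).toNat) (gravityA m n nb) (0 + erased)) = 0
    rw [eraseSet_degenerate m n _ h]
    rfl
  · show loopB m n ((m*n).toNat + 1) (board.map (fun s => s.toList.map some)) 0 = 0
    rw [show (m*n).toNat + 1 = Nat.succ ((m*n).toNat) from rfl]
    show (let cells := cellsB m n (board.map (fun s => s.toList.map some))
          if cells.isEmpty then 0
          else
            let total := 0 + PySem.Set.len cells
            let g := clearCells cells (board.map (fun s => s.toList.map some))
            let g := (PySem.List.pyRange 0 n 1).foldl (fun g j => compactColumn m j g) g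
            loopB m n ((m*n).toNat) g total) = 0
    rw [cellsB_degenerate m n _ h]
    rfl

theorem solution_spec : Claim_equal_solution := by
  intro m n board _ hpre
  unfold Spec_solution
  rcases hpre with hpre | hdeg
  · unfold solution solution_alt
    obtain ⟨hm, hn0, hrows⟩ := hpre
    have hmM : m = ((board.length : Nat) : Int) := hm.symm
    have hnN : n = ((n.toNat : Nat) : Int) := (Int.toNat_of_nonneg hn0).symm
    rw [hmM, hnN]
    apply loop_eq
    apply dims_init
    intro s hs
    have := hrows s hs
    omega
  · obtain ⟨h1, h2⟩ := solution_degenerate m n board hdeg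
    rw [h1, h2]
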